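-- pv_equiv track=rewrite | github.com/codernayeem/calculator | src/main/python/tools.py | fix_bracket
-- ===== SOURCE A (Python) =====
-- def fix_bracket(exp, symbols, include_in_bracket, put_baracket_at_first=False):
--     old_char, new_exp, got_symbol = None, '', False
--     for a_char in exp:
--         if old_char is not None:
--             if got_symbol:
--                 if a_char in include_in_bracket:
--                     new_exp += a_char
--                 else:
--                     new_exp += ')' + a_char
--                     got_symbol = False
--             elif old_char in symbols:
--                 got_symbol = True
--                 if put_baracket_at_first:
--                     new_exp += '('
--                 new_exp += a_char
--             else:
--                 new_exp += a_char
--             old_char = a_char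
--         else:
--             old_char = a_char
--             new_exp += a_char
--     if got_symbol:
--         new_exp += ')'
--     return new_exp
-- ===== SOURCE B (Python) =====
-- def fix_bracket(exp, symbols, include_in_bracket, put_baracket_at_first=False):
--     n = len(exp)
--     if n == 0:
--         return ''
--     out = [exp[0]]
--     i = 1
--     while i < n:
--         if exp[i - 1] in symbols:
--             # open a bracketed segment: char right after a symbol is always taken
--             if put_baracket_at_first:
--                 out.append('(')
--             out.append(exp[i])
--             i += 1
--             while i < n and exp[i] in include_in_bracket:
--                 out.append(exp[i])
--                 i += 1
--             out.append(')')
--             if i < n: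
--                 # the stopping char closes the segment and may trigger a new one
--                 out.append(exp[i])
--                 i += 1
--         else:
--             out.append(exp[i])
--             i += 1
--     return ''.join(out)
-- ===== Notes on version B (the rewrite author's own statement) =====
-- stated objective: alternative
-- what changed: Replaces A's single char-by-char state machine (old_char/got_symbol flags threaded through one for-loop) by an index-driven segment walk: an outer loop that, on a symbol trigger, emits the whole bracketed segment at once via an inner while-loop and then resumes.
import Mathlib
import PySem

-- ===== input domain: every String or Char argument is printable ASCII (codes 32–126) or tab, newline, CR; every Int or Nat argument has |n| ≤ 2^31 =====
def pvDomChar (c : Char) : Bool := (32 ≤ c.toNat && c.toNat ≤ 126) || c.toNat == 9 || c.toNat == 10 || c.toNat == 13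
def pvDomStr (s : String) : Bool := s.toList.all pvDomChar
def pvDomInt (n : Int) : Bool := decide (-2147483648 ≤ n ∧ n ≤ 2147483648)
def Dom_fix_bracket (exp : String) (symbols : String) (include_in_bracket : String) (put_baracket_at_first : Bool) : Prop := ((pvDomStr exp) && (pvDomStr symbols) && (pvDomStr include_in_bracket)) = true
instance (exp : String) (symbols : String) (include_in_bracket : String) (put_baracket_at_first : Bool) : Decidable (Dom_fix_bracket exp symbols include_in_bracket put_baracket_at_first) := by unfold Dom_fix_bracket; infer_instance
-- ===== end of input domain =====

-- B rewrites A's flag-threaded character state machine as an index-driven segment walk (same O(n) cost).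

-- ===== PORT A =====
-- one iteration of A's for-loop: state (old_char, new_exp, got_symbol), characters appended at the end
def stepA (syms inc : List Char) (pb : Bool) (st : Option Char × List Char × Bool) (a_char : Char) :
    Option Char × List Char × Bool :=
  match st with
  | (some old, new_exp, got_symbol) =>
    if got_symbol then
      if a_char ∈ inc then (some a_char, new_exp ++ [a_char], true)
      else (some a_char, new_exp ++ [')', a_char], false)
    else if old ∈ syms then
      (some a_char, new_exp ++ (if pb then ['('] else []) ++ [a_char], true)
    else (some a_char, new_exp ++ [a_char], false)
  | (none, new_exp, got_symbol) => (some a_char, new_exp ++ [a_char], got_symbol)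

def fix_bracket (exp : String) (symbols : String) (include_in_bracket : String) (put_baracket_at_first : Bool) : String :=
  let st := exp.toList.foldl (stepA symbols.toList include_in_bracket.toList put_baracket_at_first)
    (none, [], false)
  String.mk (st.2.1 ++ (if st.2.2 then [')'] else []))

-- ===== PORT B =====
-- inner while-loop of Source B: collect following chars that are in include_in_bracket, return (collected, remainder)
def innerB (inc : List Char) : List Char → List Char × List Char
  | [] => ([], [])
  | c :: rs => if c ∈ inc then
      let p := innerB inc rs
      (c :: p.1, p.2)
    else ([], c :: rs)

theorem innerB_snd_length (inc : List Char) : ∀ l : List Char, (innerB inc l).2.length ≤ l.length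
  | [] => by simp [innerB]
  | c :: rs => by
    by_cases h : c ∈ inc
    · simpa [innerB, h] using Nat.le_succ_of_le (innerB_snd_length inc rs)
    · simp [innerB, h]

-- outer loop of Source B: position i kept as (previous char, remaining suffix); contB is the
-- "if i < n: re-emit the stopping char and continue" step after a segment closes
mutual
def loopB (syms inc : List Char) (pb : Bool) (prev : Char) : List Char → List Char
  | [] => []
  | c :: rs =>
    if prev ∈ syms then
      let p := innerB inc rs
      (if pb then ['('] else []) ++ c :: p.1 ++ ')' :: contB syms inc pb p.2
    else c :: loopB syms inc pb c rs
termination_by rest => rest.length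
decreasing_by
  · have := innerB_snd_length inc rs
    simp; omega
  · simp

def contB (syms inc : List Char) (pb : Bool) : List Char → List Char
  | [] => []
  | d :: rs' => d :: loopB syms inc pb d rs'
termination_by l => l.length
decreasing_by simp
end

def fix_bracket_alt (exp : String) (symbols : String) (include_in_bracket : String) (put_baracket_at_first : Bool) : String :=
  match exp.toList with
  | [] => ""
  | c :: rs => String.mk (c :: loopB symbols.toList include_in_bracket.toList put_baracket_at_first c rs)

-- ===== PRECONDITION & SPEC =====
def Spec_fix_bracket (exp : String) (symbols : String) (include_in_bracket : String) (put_baracket_at_first : Bool) (out : String) : Prop := out = fix_bracket_alt exp symbols include_in_bracket put_baracket_at_first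
instance (exp : String) (symbols : String) (include_in_bracket : String) (put_baracket_at_first : Bool) (out : String) : Decidable (Spec_fix_bracket exp symbols include_in_bracket put_baracket_at_first out) := by unfold Spec_fix_bracket; infer_instance

-- ===== CLAIM (what is proved, stated in full; the proofs are below) =====
def Claim_equal_fix_bracket : Prop := ∀ (exp : String) (symbols : String) (include_in_bracket : String) (put_baracket_at_first : Bool), Dom_fix_bracket exp symbols include_in_bracket put_baracket_at_first → Spec_fix_bracket exp symbols include_in_bracket put_baracket_at_first (fix_bracket exp symbols include_in_bracket put_baracket_at_first)

-- ===== LEMMAS AND PROOFS =====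

-- proof-only restatement of A's loop as a producer of the emitted characters
def loopA (syms inc : List Char) (pb : Bool) (old : Char) (got : Bool) : List Char → List Char
  | [] => if got then [')'] else []
  | c :: rs =>
    if got then
      if c ∈ inc then c :: loopA syms inc pb c true rs
      else ')' :: c :: loopA syms inc pb c false rs
    else if old ∈ syms then
      (if pb then ['('] else []) ++ c :: loopA syms inc pb c true rs
    else c :: loopA syms inc pb c false rs

theorem foldl_loopA (syms inc : List Char) (pb : Bool) :
    ∀ (rest : List Char) (old : Char) (got : Bool) (acc : List Char),
    (let st := rest.foldl (stepA syms inc pb) (some old, acc, got)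
     st.2.1 ++ (if st.2.2 then [')'] else [])) = acc ++ loopA syms inc pb old got rest
  | [], old, got, acc => by cases got <;> simp [loopA]
  | c :: rs, old, got, acc => by
    cases got with
    | true =>
      by_cases h : c ∈ inc <;>
        simp only [List.foldl_cons, stepA, if_pos rfl, h, if_true, if_false,
          foldl_loopA syms inc pb rs c, loopA] <;> simp [h]
    | false =>
      by_cases h : old ∈ syms <;>
        simp only [List.foldl_cons, stepA, h, if_true, if_false, Bool.false_eq_true,
          foldl_loopA syms inc pb rs c, loopA] <;> simp [h]

theorem loopA_eq_loopB (syms inc : List Char) (pb : Bool) :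
    ∀ (rest : List Char),
      (∀ old : Char, loopA syms inc pb old false rest = loopB syms inc pb old rest) ∧
      (∀ old : Char, loopA syms inc pb old true rest =
        (innerB inc rest).1 ++ ')' :: contB syms inc pb (innerB inc rest).2)
  | [] => by
    constructor <;> intro old
    · rw [loopB.eq_def]; simp [loopA]
    · rw [contB.eq_def]; simp [loopA, innerB]
  | c :: rs => by
    have ih := loopA_eq_loopB syms inc pb rs
    constructor
    · intro old
      by_cases h : old ∈ syms
      · rw [loopB.eq_def]; simp [loopA, h, ih.2 c]
      · rw [loopB.eq_def]; simp [loopA, h, ih.1 c]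
    · intro old
      by_cases h : c ∈ inc
      · simp [loopA, innerB, h, ih.2 c]
      · rw [contB.eq_def]; simp [loopA, innerB, h, ih.1 c]
termination_by rest => rest.length

-- ===== VERDICT (by name: the statement is the Claim_ definition above) =====
theorem fix_bracket_spec : Claim_equal_fix_bracket := by
  intro exp symbols include_in_bracket pb _
  unfold Spec_fix_bracket fix_bracket fix_bracket_alt
  cases hl : exp.toList with
  | nil => rfl
  | cons c rs =>
    have h1 := foldl_loopA symbols.toList include_in_bracket.toList pb rs c false [c]
    have h2 := (loopA_eq_loopB symbols.toList include_in_bracket.toList pb rs).1 c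
    simp only [List.foldl_cons, stepA, List.nil_append] at h1
    simp only [List.foldl_cons, stepA, List.nil_append]
    exact (congrArg String.mk h1).trans (by rw [h2]; rfl)
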